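-- pv_equiv track=rewrite | github.com/swy0123/programmers | python/2022-11/2022-11-11/programmers42840.py | solution
-- ===== SOURCE A (Python) =====
-- def solution(answers):
--     fst = [1, 2, 3, 4, 5] * (len(answers)//5+1)
--     sec = [2, 1, 2, 3, 2, 4, 2, 5] * (len(answers)//8+1)
--     thd = [3, 3, 1, 1, 2, 2, 4, 4, 5, 5] * (len(answers)//10+1)
--     score = [[0,1], [0,2], [0,3]]
--
--     for i in range(len(answers)):
--         if answers[i] == fst[i]: score[0][0] += 1
--         if answers[i] == sec[i]: score[1][0] += 1
--         if answers[i] == thd[i]: score[2][0] += 1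
--     score.sort(key=lambda x: (x[0], -x[1]) ,reverse=True)
--     answer = [score[0][1]]
--     for i in score[1:]:
--         if i[0] == score[0][0]:
--             answer.append(i[1])
--
--     return answer
-- ===== SOURCE B (Python) =====
-- def solution(answers):
--     patterns = [[1, 2, 3, 4, 5],
--                 [2, 1, 2, 3, 2, 4, 2, 5],
--                 [3, 3, 1, 1, 2, 2, 4, 4, 5, 5]]
--     scores = []
--     for full in patterns:
--         s, pat = 0, full
--         for a in answers:
--             if not pat:
--                 pat = full
--             s += a == pat[0]
--             pat = pat[1:]
--         scores.append(s)
--     best = max(scores)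
--     return [i + 1 for i, s in enumerate(scores) if s == best]
-- ===== Notes on version B (the rewrite author's own statement) =====
-- stated objective: alternative
-- what changed: B scores each supervisor in its own pass by consuming a rotating pattern suffix that refills when exhausted (no indices, no modulo, no pre-expanded tiled lists), and selects winners by max-then-filter over the three scores instead of A's sort-with-tuple-key followed by a tie-collection loop.
import Mathlib
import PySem

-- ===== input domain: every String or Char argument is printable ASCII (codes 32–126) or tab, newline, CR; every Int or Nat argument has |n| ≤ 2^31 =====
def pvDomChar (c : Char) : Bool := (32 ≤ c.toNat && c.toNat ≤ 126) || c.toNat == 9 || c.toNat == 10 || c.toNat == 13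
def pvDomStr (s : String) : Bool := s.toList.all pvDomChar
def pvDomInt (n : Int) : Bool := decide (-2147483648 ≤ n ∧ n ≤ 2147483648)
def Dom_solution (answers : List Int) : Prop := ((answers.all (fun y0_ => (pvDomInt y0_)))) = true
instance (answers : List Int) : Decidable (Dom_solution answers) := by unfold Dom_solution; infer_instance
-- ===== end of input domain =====

-- B scores each supervisor in its own pass by consuming a rotating pattern suffix that refills when
-- exhausted (no indices, no pre-expanded tiled lists), and picks winners by max-then-filter instead
-- of A's sort-with-tuple-key plus tie-collection loop (alternative decomposition, same cost).

set_option maxRecDepth 4000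
set_option maxHeartbeats 1000000

-- ===== PORT A =====
def solution (answers : List Int) : List Int :=
  let n : Int := PySem.List.len answers
  let fst := PySem.List.pyRepeat ([1,2,3,4,5] : List Int) (PySem.Int.floordiv n 5 + 1)
  let sec := PySem.List.pyRepeat ([2,1,2,3,2,4,2,5] : List Int) (PySem.Int.floordiv n 8 + 1)
  let thd := PySem.List.pyRepeat ([3,3,1,1,2,2,4,4,5,5] : List Int) (PySem.Int.floordiv n 10 + 1)
  let s := (PySem.List.pyRange 0 n 1).foldl
    (fun (s : Int × Int × Int) i =>
      ((if PySem.List.pyGetD answers i 0 = PySem.List.pyGetD fst i 0 then s.1 + 1 else s.1),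
       (if PySem.List.pyGetD answers i 0 = PySem.List.pyGetD sec i 0 then s.2.1 + 1 else s.2.1),
       (if PySem.List.pyGetD answers i 0 = PySem.List.pyGetD thd i 0 then s.2.2 + 1 else s.2.2)))
    (0, 0, 0)
  let score : List (Int × Int) :=
    PySem.List.sorted2 [(s.1, 1), (s.2.1, 2), (s.2.2, 3)] (fun x => x.1) (fun x => -x.2) true
  let top := PySem.List.pyGetD score 0 (0, 0)
  (PySem.List.slice score (some 1) none).foldl
    (fun acc x => if x.1 = top.1 then acc ++ [x.2] else acc) [top.2]

-- ===== PORT B =====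
-- Source B's inner loop: state (s, pat); refill pat from full when empty, compare with pat[0], drop it.
-- pat[0] is ported as headD 0: exact here because after the refill pat is nonempty (full is a
-- nonempty literal).
def scoreFold (answers full : List Int) : Int :=
  (answers.foldl
    (fun (st : Int × List Int) a =>
      let pat := if st.2.isEmpty then full else st.2
      (st.1 + (if a = pat.headD 0 then 1 else 0), pat.tail))
    (0, full)).1

def solution_alt (answers : List Int) : List Int :=
  let patterns : List (List Int) :=
    [[1,2,3,4,5], [2,1,2,3,2,4,2,5], [3,3,1,1,2,2,4,4,5,5]]
  let scores := patterns.map (fun full => scoreFold answers full)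
  let best := (PySem.List.max? scores (fun y => y)).getD 0
  (PySem.List.enumerate scores).filterMap
    (fun is => if is.2 = best then some (is.1 + 1) else none)

-- ===== PRECONDITION & SPEC =====
def Spec_solution (answers : List Int) (out : List Int) : Prop := out = solution_alt answers
instance (answers : List Int) (out : List Int) : Decidable (Spec_solution answers out) := by unfold Spec_solution; infer_instance

-- ===== CLAIM (what is proved, stated in full; the proofs are below) =====
def Claim_equal_solution : Prop := ∀ (answers : List Int), Dom_solution answers → Spec_solution answers (solution answers)

-- ===== LEMMAS AND PROOFS =====

-- reference count: matches of xs against pattern p read cyclically starting at offset k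
def mcount (p : List Int) : List Int → Nat → Int
  | [], _ => 0
  | a :: t, k => (if a = p.getD (k % p.length) 0 then 1 else 0) + mcount p t (k + 1)

lemma mcount_period (p : List Int) (xs : List Int) : ∀ k, mcount p xs (k + p.length) = mcount p xs k := by
  induction xs with
  | nil => intro k; rfl
  | cons a t ih =>
    intro k
    simp only [mcount, Nat.add_mod_right]
    rw [show k + p.length + 1 = (k + 1) + p.length by omega, ih]

lemma mcount_append (p : List Int) (xs : List Int) (y : Int) :
    ∀ k, mcount p (xs ++ [y]) k
      = mcount p xs k + (if y = p.getD ((k + xs.length) % p.length) 0 then 1 else 0) := by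
  induction xs with
  | nil => intro k; simp [mcount]
  | cons a t ih =>
    intro k
    simp only [List.cons_append, mcount, ih (k + 1), List.length_cons]
    have : k + 1 + t.length = k + (t.length + 1) := by omega
    rw [this]
    ring

-- indexing into a flattened replication is modular indexing into the base list
lemma flatten_replicate_getD (p : List Int) (m i : Nat) (h : i < m * p.length) :
    ((List.replicate m p).flatten).getD i 0 = p.getD (i % p.length) 0 := by
  induction m generalizing i with
  | zero => simp at h
  | succ m ih =>
    rcases Nat.lt_or_ge i p.length with hi | hi
    · rw [List.replicate_succ, List.flatten_cons, List.getD_eq_getElem?_getD,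
        List.getElem?_append_left hi, ← List.getD_eq_getElem?_getD, Nat.mod_eq_of_lt hi]
    · rw [List.replicate_succ, List.flatten_cons, List.getD_eq_getElem?_getD,
        List.getElem?_append_right hi, ← List.getD_eq_getElem?_getD,
        ih (i - p.length) (by have hs : (m+1) * p.length = m * p.length + p.length := Nat.succ_mul m p.length; omega)]
      congr 1
      exact (Nat.mod_eq_sub_mod hi).symm

-- A's expanded-pattern lookup is modular lookup into the base pattern
lemma repGet (p : List Int) (k : Int) (hp : p.length ≠ 0) (hk : (p.length : Int) = k)
    (n : Int) (j : Nat) (hn : (j : Int) < n) :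
    PySem.List.pyGetD (PySem.List.pyRepeat p (PySem.Int.floordiv n k + 1)) (j : Int) 0
      = p.getD (j % p.length) 0 := by
  subst hk
  have hkpos : (0 : Int) < (p.length : Int) := by exact_mod_cast Nat.pos_of_ne_zero hp
  have h0n : (0 : Int) ≤ n := le_trans (Int.natCast_nonneg j) (le_of_lt hn)
  have hfd : PySem.Int.floordiv n (p.length : Int) = n / (p.length : Int) := by
    unfold PySem.Int.floordiv
    rw [Int.fdiv_eq_ediv, if_pos (Or.inl (le_of_lt hkpos)), sub_zero]
  have hdn : (0 : Int) ≤ n / (p.length : Int) := Int.ediv_nonneg h0n (le_of_lt hkpos)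
  have hlt2 : n < (n / (p.length : Int) + 1) * (p.length : Int) :=
    Int.lt_ediv_add_one_mul_self n hkpos
  have hjm : j < (n / (p.length : Int) + 1).toNat * p.length := by
    have h1 : (((n / (p.length : Int) + 1).toNat * p.length : Nat) : Int)
        = (n / (p.length : Int) + 1) * (p.length : Int) := by
      push_cast
      rw [Int.toNat_of_nonneg (by omega)]
    omega
  rw [hfd]
  unfold PySem.List.pyRepeat
  rw [PySem.List.pyGetD_natCast]
  exact flatten_replicate_getD p _ j hjm

-- a componentwise triple fold splits into three independent folds
lemma foldl_prod3 {ι : Type} (l : List ι) (q1 q2 q3 : ι → Prop)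
    [DecidablePred q1] [DecidablePred q2] [DecidablePred q3] :
    ∀ (a b c : Int),
      l.foldl (fun (s : Int × Int × Int) i =>
          ((if q1 i then s.1 + 1 else s.1),
           (if q2 i then s.2.1 + 1 else s.2.1),
           (if q3 i then s.2.2 + 1 else s.2.2))) (a, b, c)
        = (l.foldl (fun s i => if q1 i then s + 1 else s) a,
           l.foldl (fun s i => if q2 i then s + 1 else s) b,
           l.foldl (fun s i => if q3 i then s + 1 else s) c) := by
  induction l with
  | nil => intro a b c; rfl
  | cons x t ih => intro a b c; simp only [List.foldl_cons]; exact ih _ _ _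

-- A's per-pattern indexed range fold counts cyclic matches
lemma rangeCount (p : List Int) (hp : p ≠ []) (f : Int → Int) :
    ∀ (ys : List Int), (∀ j : Nat, (j : Int) < PySem.List.len ys → f (j : Int) = p.getD (j % p.length) 0) →
      (PySem.List.pyRange 0 (PySem.List.len ys) 1).foldl
        (fun (s : Int) i => if PySem.List.pyGetD ys i 0 = f i then s + 1 else s) 0
      = mcount p ys 0 := by
  intro ys
  induction ys using List.reverseRecOn with
  | nil => intro _; simp [PySem.List.pyRange_one_eq_nil, mcount, PySem.List.len]
  | append_singleton ys y ih =>
    intro hf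
    have hlen : PySem.List.len (ys ++ [y]) = PySem.List.len ys + 1 := by
      simp [PySem.List.len]
    have h0 : (0 : Int) ≤ PySem.List.len ys := by simp [PySem.List.len]
    rw [hlen, PySem.List.pyRange_one_succ_right h0, List.foldl_append]
    have hinner :
        (PySem.List.pyRange 0 (PySem.List.len ys) 1).foldl
          (fun (s : Int) i => if PySem.List.pyGetD (ys ++ [y]) i 0 = f i then s + 1 else s) 0
        = (PySem.List.pyRange 0 (PySem.List.len ys) 1).foldl
          (fun (s : Int) i => if PySem.List.pyGetD ys i 0 = f i then s + 1 else s) 0 := by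
      refine PySem.List.foldl_congr_mem _ _ _ _ ?_
      intro acc i hi
      obtain ⟨hi0, hilt⟩ := (PySem.List.mem_pyRange_one).1 hi
      obtain ⟨j, rfl⟩ : ∃ j : Nat, i = (j : Int) := ⟨i.toNat, (Int.toNat_of_nonneg hi0).symm⟩
      have hjlt : j < ys.length := by simp [PySem.List.len] at hilt; exact_mod_cast hilt
      rw [PySem.List.pyGetD_natCast, PySem.List.pyGetD_natCast,
        List.getD_eq_getElem?_getD, List.getElem?_append_left hjlt, ← List.getD_eq_getElem?_getD]
    rw [hinner, ih (fun j hj => hf j (by rw [hlen]; omega))]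
    have hget : PySem.List.pyGetD (ys ++ [y]) (PySem.List.len ys) 0 = y := by
      simp [PySem.List.len, PySem.List.pyGetD_natCast]
    have hfv : f (PySem.List.len ys) = p.getD (ys.length % p.length) 0 := by
      have := hf ys.length (by rw [hlen]; simp [PySem.List.len])
      simpa [PySem.List.len] using this
    rw [mcount_append]
    simp only [List.foldl_cons, List.foldl_nil, hget, hfv, Nat.zero_add]
    split_ifs <;> omega

-- B's rotating-suffix fold counts the same cyclic matches
lemma scoreFold_go (p : List Int) (hp : p ≠ []) :
    ∀ (xs : List Int) (k : Nat) (acc : Int), k ≤ p.length →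
      (xs.foldl
        (fun (st : Int × List Int) a =>
          let pat := if st.2.isEmpty then p else st.2
          (st.1 + (if a = pat.headD 0 then 1 else 0), pat.tail))
        (acc, p.drop k)).1 = acc + mcount p xs k := by
  intro xs
  induction xs with
  | nil => intro k acc _; simp [mcount]
  | cons a t ih =>
    intro k acc hk
    have hL : 0 < p.length := List.length_pos_of_ne_nil hp
    rcases Nat.lt_or_ge k p.length with hlt | hge
    · have hne : (p.drop k).isEmpty = false := by
        simp [List.drop_eq_nil_iff]; omega
      have hhead : (p.drop k).headD 0 = p.getD (k % p.length) 0 := by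
        rw [Nat.mod_eq_of_lt hlt, List.headD_eq_head?_getD, List.head?_drop,
          List.getD_eq_getElem?_getD]
      simp only [List.foldl_cons, hne, Bool.false_eq_true, if_false, List.tail_drop]
      rw [ih (k + 1) _ (by omega), mcount, hhead]
      ring
    · have hkL : k = p.length := le_antisymm hk hge
      subst hkL
      have hemp : (p.drop p.length).isEmpty = true := by simp
      have hhead : p.headD 0 = p.getD (p.length % p.length) 0 := by
        rw [Nat.mod_self]
        cases p with
        | nil => exact absurd rfl hp
        | cons b q => rfl
      have htail : p.tail = p.drop 1 := List.drop_one.symm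
      simp only [List.foldl_cons, hemp, if_true, htail]
      rw [ih 1 _ (by omega), mcount, hhead]
      have : mcount p t (p.length + 1) = mcount p t 1 := by
        rw [show p.length + 1 = 1 + p.length by omega, mcount_period]
      rw [this]
      ring

lemma scoreFold_eq_mcount (p : List Int) (hp : p ≠ []) (answers : List Int) :
    scoreFold answers p = mcount p answers 0 := by
  unfold scoreFold
  have := scoreFold_go p hp answers 0 0 (Nat.zero_le _)
  simpa using this

-- A's 3-element insertion sort, evaluated
lemma sort3 (c1 c2 c3 : Int) :
    PySem.List.sorted2 [(c1,1),(c2,2),(c3,3)] (fun x => x.1) (fun x => -x.2) true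
    = if c1 < c2 then
        (if c2 < c3 then [(c3,3),(c2,2),(c1,1)]
         else if c1 < c3 then [(c2,2),(c3,3),(c1,1)] else [(c2,2),(c1,1),(c3,3)])
      else
        (if c1 < c3 then [(c3,3),(c1,1),(c2,2)]
         else if c2 < c3 then [(c1,1),(c3,3),(c2,2)] else [(c1,1),(c2,2),(c3,3)]) := by
  simp only [PySem.List.sorted2, List.foldl]
  by_cases h12 : c1 < c2 <;> by_cases h13 : c1 < c3 <;> by_cases h23 : c2 < c3 <;>
    simp [PySem.List.insertBy, h12, h13, h23]

-- A's tie-collection loop over a literal 3-element score list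
lemma collect3 (a1 a2 a3 j1 j2 j3 : Int) :
    (PySem.List.slice ([(a1,j1),(a2,j2),(a3,j3)] : List (Int × Int)) (some 1) none).foldl
      (fun acc x => if x.1 = (PySem.List.pyGetD ([(a1,j1),(a2,j2),(a3,j3)] : List (Int × Int)) 0 (0,0)).1 then acc ++ [x.2] else acc)
      [(PySem.List.pyGetD ([(a1,j1),(a2,j2),(a3,j3)] : List (Int × Int)) 0 (0,0)).2]
    = [j1] ++ (if a2 = a1 then [j2] else []) ++ (if a3 = a1 then [j3] else []) := by
  simp [PySem.List.slice, PySem.List.clampIdx, PySem.List.pyGetD, PySem.List.pyGet?, PySem.List.pyIdx?, List.foldl]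
  split_ifs <;> simp

-- B's enumerate-filter over the literal 3-element score list
lemma filter3 (b c1 c2 c3 : Int) :
    (PySem.List.enumerate ([c1, c2, c3] : List Int)).filterMap
      (fun is => if is.2 = b then some (is.1 + 1) else none)
    = (if c1 = b then [1] else []) ++ (if c2 = b then [2] else []) ++ (if c3 = b then [3] else []) := by
  by_cases e1 : c1 = b <;> by_cases e2 : c2 = b <;> by_cases e3 : c3 = b <;>
    simp [PySem.List.enumerate, e1, e2, e3]

-- python max of the literal 3-element score list
lemma max3 (c1 c2 c3 : Int) :
    (PySem.List.max? ([c1, c2, c3] : List Int) (fun y => y)).getD 0 = max c1 (max c2 c3) := by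
  rw [PySem.List.max?_id_cons]
  simp [List.foldl, max_assoc]

-- A's sort-then-collect equals B's max-then-filter on any count triple
lemma select_eq (c1 c2 c3 : Int) :
    (let score : List (Int × Int) :=
       PySem.List.sorted2 [(c1, 1), (c2, 2), (c3, 3)] (fun x => x.1) (fun x => -x.2) true
     let top := PySem.List.pyGetD score 0 (0, 0)
     (PySem.List.slice score (some 1) none).foldl
       (fun acc x => if x.1 = top.1 then acc ++ [x.2] else acc) [top.2])
    = (let best := (PySem.List.max? ([c1, c2, c3] : List Int) (fun y => y)).getD 0
       (PySem.List.enumerate ([c1, c2, c3] : List Int)).filterMap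
         (fun is => if is.2 = best then some (is.1 + 1) else none)) := by
  simp only [sort3, max3]
  rcases lt_or_ge c1 c2 with h12 | h12
  · rcases lt_or_ge c2 c3 with h23 | h23
    · have hb : max c1 (max c2 c3) = c3 := by rw [max_def, max_def]; split_ifs <;> omega
      simp only [if_pos h12, if_pos h23, collect3, hb, filter3]
      simp [show ¬c2 = c3 by omega, show ¬c1 = c3 by omega]
    · rcases lt_or_ge c1 c3 with h13 | h13
      · have hb : max c1 (max c2 c3) = c2 := by rw [max_def, max_def]; split_ifs <;> omega
        simp only [if_pos h12, if_neg (not_lt.mpr h23), if_pos h13, collect3, hb, filter3]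
        by_cases h : c3 = c2 <;> simp [h, show ¬c1 = c2 by omega]
      · have hb : max c1 (max c2 c3) = c2 := by rw [max_def, max_def]; split_ifs <;> omega
        simp only [if_pos h12, if_neg (not_lt.mpr h23), if_neg (not_lt.mpr h13), collect3, hb, filter3]
        simp [show ¬c1 = c2 by omega, show ¬c3 = c2 by omega]
  · rcases lt_or_ge c1 c3 with h13 | h13
    · have hb : max c1 (max c2 c3) = c3 := by rw [max_def, max_def]; split_ifs <;> omega
      simp only [if_neg (not_lt.mpr h12), if_pos h13, collect3, hb, filter3]
      simp [show ¬c1 = c3 by omega, show ¬c2 = c3 by omega]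
    · rcases lt_or_ge c2 c3 with h23 | h23
      · have hb : max c1 (max c2 c3) = c1 := by rw [max_def, max_def]; split_ifs <;> omega
        simp only [if_neg (not_lt.mpr h12), if_neg (not_lt.mpr h13), if_pos h23, collect3, hb, filter3]
        by_cases h : c3 = c1 <;> simp [h, show ¬c2 = c1 by omega]
      · have hb : max c1 (max c2 c3) = c1 := by rw [max_def, max_def]; split_ifs <;> omega
        simp only [if_neg (not_lt.mpr h12), if_neg (not_lt.mpr h13), if_neg (not_lt.mpr h23), collect3, hb, filter3]
        by_cases h2 : c2 = c1 <;> by_cases h3 : c3 = c1 <;> simp [h2, h3]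

-- ===== VERDICT (by name: the statement is the Claim_ definition above) =====
theorem solution_spec : Claim_equal_solution := by
  intro answers _
  show solution answers = solution_alt answers
  unfold solution solution_alt
  simp only [List.map_cons, List.map_nil]
  rw [foldl_prod3]
  rw [rangeCount ([1,2,3,4,5] : List Int) (by decide) _ answers
        (fun j hj => repGet _ 5 (by decide) (by norm_num) _ j hj),
      rangeCount ([2,1,2,3,2,4,2,5] : List Int) (by decide) _ answers
        (fun j hj => repGet _ 8 (by decide) (by norm_num) _ j hj),
      rangeCount ([3,3,1,1,2,2,4,4,5,5] : List Int) (by decide) _ answers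
        (fun j hj => repGet _ 10 (by decide) (by norm_num) _ j hj)]
  simp only [scoreFold_eq_mcount ([1,2,3,4,5] : List Int) (by decide) answers,
      scoreFold_eq_mcount ([2,1,2,3,2,4,2,5] : List Int) (by decide) answers,
      scoreFold_eq_mcount ([3,3,1,1,2,2,4,4,5,5] : List Int) (by decide) answers]
  exact select_eq _ _ _
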